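-- pv_equiv track=rewrite | github.com/nugroho-s/LeetcodeSolutions | Reveal Cards In Increasing Order/solution.py | deckRevealedIncreasing
-- ===== SOURCE A (Python) =====
-- from typing import List
--
-- def deckRevealedIncreasing(deck: List[int]) -> List[int]:
--     deck.sort(reverse=True)
--     shuffled_deck = [deck[0]]
--     for i in range(1, len(deck)):
--         card = deck[i]
--         temp = shuffled_deck[-1]
--         shuffled_deck = shuffled_deck[:-1]
--         shuffled_deck.insert(0,temp)
--         shuffled_deck.insert(0, card)
--     return shuffled_deck
-- ===== SOURCE B (Python) =====
-- def deckRevealedIncreasing(deck):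
--     # Simulate the reveal process on a queue of positions, placing sorted cards.
--     # Note: does not mutate `deck` (A sorts it in place); return value is the same.
--     n = len(deck)
--     res = [0] * n
--     q = list(range(n))
--     head = 0
--     for card in sorted(deck):
--         res[q[head]] = card          # this position is revealed next
--         head += 1
--         if head < len(q):            # move the following position to the back
--             q.append(q[head])
--             head += 1
--     return res
-- ===== Notes on version B (the rewrite author's own statement) =====
-- stated objective: faster
-- what changed: A repeatedly rebuilds the whole deck (slice copy + two front insertions per card, O(n^2)); B sorts once and simulates the reveal process on a queue of positions with a head pointer, placing each sorted card directly at its final index in O(n log n).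
import Mathlib
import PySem

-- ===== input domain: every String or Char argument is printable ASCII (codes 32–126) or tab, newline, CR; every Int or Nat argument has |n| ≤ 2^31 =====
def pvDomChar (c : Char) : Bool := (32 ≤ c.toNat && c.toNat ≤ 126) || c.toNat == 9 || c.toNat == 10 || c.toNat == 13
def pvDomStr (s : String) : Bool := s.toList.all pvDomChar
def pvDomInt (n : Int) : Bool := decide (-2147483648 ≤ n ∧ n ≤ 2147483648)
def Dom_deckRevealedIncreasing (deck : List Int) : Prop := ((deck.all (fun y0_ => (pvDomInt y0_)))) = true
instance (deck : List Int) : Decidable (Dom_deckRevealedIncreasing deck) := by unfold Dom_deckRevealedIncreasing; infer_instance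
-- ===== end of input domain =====

-- B replaces A's O(n^2) rebuild-the-deck-backwards loop by an O(n log n) queue-of-positions
-- simulation (sort, then place each card at the next revealed position); return values agree —
-- note A sorts its argument in place (a side effect B does not perform).

-- ===== PORT A =====
-- loop body of A: card :: temp :: shuffled_deck[:-1]; 'none' branch unreachable (shuffled_deck never empty)
def pvStepA (S : List Int) (card : Int) : List Int :=
  match S.getLast? with
  | some temp => card :: temp :: S.dropLast
  | none => S

def deckRevealedIncreasing (deck : List Int) : List Int :=
  let d := PySem.List.sorted deck (fun x => x) true
  match d with
  | [] => []  -- Python raises IndexError at deck[0]; excluded by Pre_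
  | d0 :: _ =>
    (PySem.List.pyRange 1 (d.length : Int) 1).foldl
      (fun S i => pvStepA S (PySem.List.pyGetD d i 0)) [d0]

-- ===== PORT B =====
-- loop body of B; q.getD/res.set are exact for the in-range indices the loop uses
def pvStepB (st : List Int × List Nat × Nat) (card : Int) : List Int × List Nat × Nat :=
  let res := (st.1).set ((st.2.1).getD st.2.2 0) card
  let head := st.2.2 + 1
  if head < st.2.1.length then (res, st.2.1 ++ [(st.2.1).getD head 0], head + 1)
  else (res, st.2.1, head)

def deckRevealedIncreasing_alt (deck : List Int) : List Int :=
  let n := deck.length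
  ((PySem.List.sorted deck (fun x => x) false).foldl pvStepB
    (List.replicate n 0, List.range n, 0)).1

-- ===== PRECONDITION & SPEC =====
-- Pre_ excludes only the empty list, on which A raises IndexError (deck[0]).
def Pre_deckRevealedIncreasing (deck : List Int) : Prop := deck ≠ []
instance (deck : List Int) : Decidable (Pre_deckRevealedIncreasing deck) := by unfold Pre_deckRevealedIncreasing; infer_instance
def pvWitness_deckRevealedIncreasing : List Int := ([1, 3, 2])

def Spec_deckRevealedIncreasing (deck : List Int) (out : List Int) : Prop := out = deckRevealedIncreasing_alt deck
instance (deck : List Int) (out : List Int) : Decidable (Spec_deckRevealedIncreasing deck out) := by unfold Spec_deckRevealedIncreasing; infer_instance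

-- ===== CLAIM (what is proved, stated in full; the proofs are below) =====
def Claim_equal_deckRevealedIncreasing : Prop := ∀ (deck : List Int), Dom_deckRevealedIncreasing deck → Pre_deckRevealedIncreasing deck → Spec_deckRevealedIncreasing deck (deckRevealedIncreasing deck)

-- ===== LEMMAS AND PROOFS =====

-- the reveal process: take the front card, move the next one to the back
def pvSpin {α : Type} : List α → List α
  | [] => []
  | [x] => [x]
  | x :: y :: t => x :: pvSpin (t ++ [y])
  termination_by l => l.length
  decreasing_by simp

def pvRot {α : Type} : List α → List α
  | [] => []
  | y :: t => t ++ [y]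

-- queue-of-positions placement, abstracting B's (res, q, head) state
def pvGq (res : List Int) (Q : List Nat) (cs : List Int) : List Int :=
  match cs, Q with
  | [], _ => res
  | _ :: _, [] => res
  | c :: cs, p :: Q' => pvGq (res.set p c) (pvRot Q') cs

theorem pvSpin_cons {α : Type} (p : α) (Q : List α) : pvSpin (p :: Q) = p :: pvSpin (pvRot Q) := by
  cases Q <;> simp [pvSpin, pvRot]

theorem pvRot_perm {α : Type} (Q : List α) : (pvRot Q).Perm Q := by
  cases Q with
  | nil => simp [pvRot]
  | cons y t => exact (List.perm_append_singleton y t)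

theorem pvSpin_perm {α : Type} (l : List α) : (pvSpin l).Perm l := by
  induction l using pvSpin.induct with
  | case1 => simp [pvSpin]
  | case2 x => simp [pvSpin]
  | case3 x y t ih =>
    simpa [pvSpin] using (ih.trans (List.perm_append_singleton y t)).cons x

theorem pvSpin_length {α : Type} (l : List α) : (pvSpin l).length = l.length :=
  (pvSpin_perm l).length_eq

theorem pvSpin_map {α β : Type} (f : α → β) (l : List α) : pvSpin (l.map f) = (pvSpin l).map f := by
  induction l using pvSpin.induct with
  | case1 => simp [pvSpin]
  | case2 x => simp [pvSpin]
  | case3 x y t ih =>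
    simp only [List.map_cons, pvSpin]
    rw [show t.map f ++ [f y] = (t ++ [y]).map f by simp, ih]

theorem pvSpin_inj {α : Type} (X Y : List α) (hl : X.length = Y.length) (h : pvSpin X = pvSpin Y) : X = Y := by
  induction X using pvSpin.induct generalizing Y with
  | case1 => cases Y <;> simp_all
  | case2 x =>
    cases Y with
    | nil => simp at hl
    | cons y1 Y' =>
      cases Y' with
      | nil => simpa [pvSpin] using h
      | cons y2 t' => simp at hl
  | case3 x y t ih =>
    cases Y with
    | nil => simp at hl
    | cons y1 Y' =>
      cases Y' with
      | nil => simp at hl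
      | cons y2 t' =>
        simp only [pvSpin, List.cons.injEq] at h
        obtain ⟨rfl, h2⟩ := h
        have hlen : (t ++ [y]).length = (t' ++ [y2]).length := by
          simp only [List.length_cons] at hl
          simp only [List.length_append, List.length_cons, List.length_nil]
          omega
        have heq := ih (t' ++ [y2]) hlen h2
        have h3 := List.append_inj heq (by
          simp only [List.length_cons] at hl
          omega)
        obtain ⟨h4, h5⟩ := h3
        simp only [List.cons.injEq, and_true] at h5
        subst h4; subst h5; rfl

theorem pvGq_length (res : List Int) (Q : List Nat) (cs : List Int) : (pvGq res Q cs).length = res.length := by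
  induction cs generalizing res Q with
  | nil => simp [pvGq]
  | cons c cs ih =>
    cases Q with
    | nil => simp [pvGq]
    | cons p Q' => simp [pvGq, ih]

theorem pvGq_unchanged (res : List Int) (Q : List Nat) (cs : List Int) (p : Nat) (hp : p ∉ Q) :
    (pvGq res Q cs).getD p 0 = res.getD p 0 := by
  induction cs generalizing res Q with
  | nil => simp [pvGq]
  | cons c cs ih =>
    cases Q with
    | nil => simp [pvGq]
    | cons p0 Q' =>
      simp only [List.mem_cons, not_or] at hp
      rw [pvGq, ih _ _ (fun hm => hp.2 ((pvRot_perm Q').mem_iff.mp hm))]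
      simp [List.getD_eq_getElem?_getD, List.getElem?_set_ne (Ne.symm hp.1)]

theorem pvGq_spin (cs : List Int) (res : List Int) (Q : List Nat) (hn : Q.Nodup)
    (hb : ∀ p ∈ Q, p < res.length) (hl : Q.length = cs.length) :
    (pvSpin Q).map (fun p => (pvGq res Q cs).getD p 0) = cs := by
  induction cs generalizing res Q with
  | nil =>
    have : Q = [] := List.eq_nil_of_length_eq_zero (by simpa using hl)
    simp [this, pvSpin]
  | cons c cs ih =>
    cases Q with
    | nil => simp at hl
    | cons p Q' =>
      rw [pvSpin_cons, List.map_cons, pvGq]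
      have hpQ : p ∉ pvRot Q' := fun hm =>
        (List.nodup_cons.mp hn).1 ((pvRot_perm Q').mem_iff.mp hm)
      have hhead : (pvGq (res.set p c) (pvRot Q') cs).getD p 0 = c := by
        rw [pvGq_unchanged _ _ _ _ hpQ]
        have hp : p < res.length := hb p (List.mem_cons_self ..)
        simp [List.getD_eq_getElem?_getD, hp]
      rw [hhead]
      congr 1
      exact ih (res.set p c) (pvRot Q')
        ((pvRot_perm Q').nodup_iff.mpr (List.nodup_cons.mp hn).2)
        (fun p' hm => by
          simpa using hb p' (List.mem_cons_of_mem _ ((pvRot_perm Q').mem_iff.mp hm)))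
        (by simpa [(pvRot_perm Q').length_eq] using Nat.succ_injective (by simpa using hl))

theorem pvFoldB_eq_Gq (cs : List Int) (res : List Int) (q : List Nat) (head : Nat)
    (hh : head ≤ q.length) (hl : q.length - head = cs.length) :
    (cs.foldl pvStepB (res, q, head)).1 = pvGq res (q.drop head) cs := by
  induction cs generalizing res q head with
  | nil => simp [pvGq]
  | cons c cs ih =>
    have hl' : q.length - head = cs.length + 1 := by simpa using hl
    have hlt : head < q.length := by omega
    have hdropq : q.drop head = q[head] :: q.drop (head + 1) := List.drop_eq_getElem_cons hlt
    have hget0 : q[head]?.getD 0 = q[head] := by simp [List.getElem?_eq_getElem hlt]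
    rw [List.foldl_cons]
    by_cases hlt2 : head + 1 < q.length
    · have hdropq1 : q.drop (head + 1) = q[head + 1] :: q.drop (head + 2) :=
        List.drop_eq_getElem_cons hlt2
      have hget1 : q[head + 1]?.getD 0 = q[head + 1] := by simp [List.getElem?_eq_getElem hlt2]
      have hstep : pvStepB (res, q, head) c =
          (res.set q[head] c, q ++ [q[head + 1]], head + 2) := by
        simp [pvStepB, List.getD, hget0, hlt2]
      rw [hstep, ih _ _ _
        (by simp only [List.length_append, List.length_cons, List.length_nil]; omega)
        (by simp only [List.length_append, List.length_cons, List.length_nil]; omega)]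
      have hR : pvGq res (q.drop head) (c :: cs) =
          pvGq (res.set q[head] c) (pvRot (q.drop (head + 1))) cs := by
        rw [hdropq, pvGq]
      rw [hR]
      congr 1
      rw [List.drop_append_of_le_length (by omega), hdropq1, pvRot]
    · have hcs : cs = [] := by
        have h1 : cs.length = 0 := by omega
        exact List.eq_nil_of_length_eq_zero h1
      have hdrop1 : q.drop (head + 1) = [] := List.drop_eq_nil_of_le (by omega)
      have hstep : pvStepB (res, q, head) c = (res.set q[head] c, q, head + 1) := by
        simp [pvStepB, List.getD, hget0, hlt2]
      rw [hstep, hcs]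
      rw [hdropq, hdrop1, pvGq, pvRot, pvGq, List.foldl_nil]

theorem pvStepA_ne_nil (S : List Int) (c : Int) (h : S ≠ []) : pvStepA S c ≠ [] := by
  simp [pvStepA, List.getLast?_eq_some_getLast h]

theorem pvSpin_stepA (S : List Int) (c : Int) (h : S ≠ []) : pvSpin (pvStepA S c) = c :: pvSpin S := by
  rw [pvStepA, List.getLast?_eq_some_getLast h]
  simp only [pvSpin]
  rw [List.dropLast_append_getLast h]

theorem pvSpin_foldA (l : List Int) (S : List Int) (h : S ≠ []) :
    pvSpin (l.foldl pvStepA S) = l.reverse ++ pvSpin S := by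
  induction l generalizing S with
  | nil => simp
  | cons c l ih =>
    rw [List.foldl_cons, ih _ (pvStepA_ne_nil S c h), pvSpin_stepA S c h]
    simp

theorem pvDesc_eq_reverse_asc (deck : List Int) :
    PySem.List.sorted deck (fun x => x) true = (PySem.List.sorted deck (fun x => x) false).reverse := by
  haveI : Std.Antisymm (fun a b : Int => b ≤ a) := ⟨fun a b h1 h2 => le_antisymm h2 h1⟩
  refine @List.Perm.eq_of_pairwise' Int (fun a b : Int => b ≤ a) _ _ _ ?_ ?_ ?_
  · exact PySem.List.sorted_pairwise_rev deck (fun x => x)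
  · exact List.pairwise_reverse.mpr (PySem.List.sorted_pairwise deck (fun x => x))
  · exact (PySem.List.sorted_perm deck (fun x => x) true).trans
      ((PySem.List.sorted_perm deck (fun x => x) false).symm.trans
        (List.reverse_perm _).symm)

theorem pvSelf_eq_map_range (l : List Int) :
    (List.range l.length).map (fun p => l.getD p 0) = l := by
  apply List.ext_getElem (by simp)
  intro i h1 h2
  simp [List.getD, List.getElem?_eq_getElem h2]

-- ===== VERDICT (by name: the statement is the Claim_ definition above) =====
theorem deckRevealedIncreasing_spec : Claim_equal_deckRevealedIncreasing := by
  intro deck _ hpre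
  unfold Spec_deckRevealedIncreasing
  have hslen : (PySem.List.sorted deck (fun x => x) false).length = deck.length :=
    PySem.List.length_sorted ..
  have hsnil : PySem.List.sorted deck (fun x => x) false ≠ [] := by
    intro h0
    exact hpre (List.eq_nil_of_length_eq_zero (by rw [← hslen, h0]; rfl))
  obtain ⟨d0, rest, hrev⟩ : ∃ d0 rest,
      (PySem.List.sorted deck (fun x => x) false).reverse = d0 :: rest := by
    cases h0 : (PySem.List.sorted deck (fun x => x) false).reverse with
    | nil => exact absurd (by simpa using h0) hsnil
    | cons a l => exact ⟨a, l, rfl⟩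
  -- A's result, as a fold of the loop body over the tail of the descending sort
  have hA : deckRevealedIncreasing deck = ((d0 :: rest).drop 1).foldl pvStepA [d0] := by
    simp only [deckRevealedIncreasing, pvDesc_eq_reverse_asc deck, hrev]
    exact PySem.List.foldl_pyRange_pyGetD' (d0 :: rest) 0 pvStepA [d0] (a := 1) (by norm_num)
  -- revealing A's result yields the ascending sort
  have hAspin : pvSpin (deckRevealedIncreasing deck) =
      PySem.List.sorted deck (fun x => x) false := by
    rw [hA, pvSpin_foldA _ _ (by simp)]
    have : PySem.List.sorted deck (fun x => x) false = (d0 :: rest).reverse := by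
      rw [← hrev, List.reverse_reverse]
    rw [this]
    simp [pvSpin]
  -- B's result, as the queue-of-positions placement
  have hB : deckRevealedIncreasing_alt deck =
      pvGq (List.replicate deck.length 0) (List.range deck.length)
        (PySem.List.sorted deck (fun x => x) false) := by
    simp only [deckRevealedIncreasing_alt]
    rw [pvFoldB_eq_Gq _ _ _ 0 (by simp) (by simp [hslen])]
    rfl
  have hBlen : (deckRevealedIncreasing_alt deck).length = deck.length := by
    rw [hB, pvGq_length]; simp
  -- revealing B's result also yields the ascending sort
  have hBspin : pvSpin (deckRevealedIncreasing_alt deck) =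
      PySem.List.sorted deck (fun x => x) false := by
    have hid : deckRevealedIncreasing_alt deck =
        (List.range deck.length).map (fun p => (deckRevealedIncreasing_alt deck).getD p 0) := by
      conv_lhs => rw [← pvSelf_eq_map_range (deckRevealedIncreasing_alt deck), hBlen]
    rw [hid, pvSpin_map]
    have := pvGq_spin (PySem.List.sorted deck (fun x => x) false)
      (List.replicate deck.length 0) (List.range deck.length)
      (List.nodup_range) (fun p hp => by simpa using List.mem_range.mp hp)
      (by simp [hslen])
    rw [← hB] at this
    simpa [← hB] using this
  -- the reveal process is injective on lists of equal length
  have hlen : (deckRevealedIncreasing deck).length = (deckRevealedIncreasing_alt deck).length := by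
    have h1 := pvSpin_length (deckRevealedIncreasing deck)
    rw [hAspin] at h1
    rw [← h1, hBlen, hslen]
  exact pvSpin_inj _ _ hlen (by rw [hAspin, hBspin])
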